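-- pv_equiv track=rewrite | github.com/doozan/wikibot | nym_sections_to_tags.py | get_nest_depth
-- ===== SOURCE A (Python) =====
-- def get_nest_depth(text, start_depth=0):
--     """
--     Returns the depth of nested templates at the end of the given line
--
--     zero }} zero {{ one {{ two {{ three }} two }} one }} zero }} zero
--     """
--
--     if start_depth<0:
--         raise ValueError("start_level cannot be negative")
--
--     depth = start_depth
--
--     first=True
--     for t in text.split("{{"):
--         if first:
--             first=False
--             if not depth:
--                 continue
--         else:
--             depth+=1
--
--         depth = max(0, depth - t.count("}}"))
--
--     return depth
-- ===== SOURCE B (Python) =====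
-- def get_nest_depth(text, start_depth=0):
--     if start_depth < 0:
--         raise ValueError("start_level cannot be negative")
--
--     depth = start_depth
--     i = 0
--     n = len(text)
--     while i < n:
--         pair = text[i:i + 2]
--         if pair == "{{":
--             depth += 1
--             i += 2
--         elif pair == "}}":
--             depth = max(0, depth - 1)
--             i += 2
--         else:
--             i += 1
--     return depth
-- ===== Notes on version B (the rewrite author's own statement) =====
-- stated objective: simpler
-- what changed: Replaces A's split on the open-brace digraph into segments plus a per-segment close-brace-digraph count with a first/continue flag by one left-to-right positional scan over two-character windows that increments the depth on an open pair and clamp-decrements it on a close pair.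
import Mathlib
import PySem

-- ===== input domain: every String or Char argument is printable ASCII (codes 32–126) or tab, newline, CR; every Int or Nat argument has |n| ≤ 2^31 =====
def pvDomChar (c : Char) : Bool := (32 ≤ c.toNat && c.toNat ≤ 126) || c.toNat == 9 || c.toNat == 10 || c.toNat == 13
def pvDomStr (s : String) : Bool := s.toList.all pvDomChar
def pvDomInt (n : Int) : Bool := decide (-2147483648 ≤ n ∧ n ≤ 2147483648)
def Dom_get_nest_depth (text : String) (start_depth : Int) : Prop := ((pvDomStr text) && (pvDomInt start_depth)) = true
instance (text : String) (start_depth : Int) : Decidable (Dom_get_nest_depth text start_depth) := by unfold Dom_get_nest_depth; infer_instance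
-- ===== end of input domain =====

-- B replaces A's split-into-segments + per-segment close-pair count + first/continue flag by a
-- single positional two-character-window scan; same O(n) cost, plainer control flow.

-- ===== PORT A =====
-- the loop body: state (first, depth); 'continue' on the first segment when depth is 0
def stepA (st : Bool × Int) (t : List Char) : Bool × Int :=
  if st.1 then
    if st.2 == 0 then (false, st.2)
    else (false, max 0 (st.2 - (PySem.Chars.count t ['}', '}'] : Int)))
  else (false, max 0 (st.2 + 1 - (PySem.Chars.count t ['}', '}'] : Int)))

def get_nest_depth (text : String) (start_depth : Int) : Int :=
  -- depth = start_depth; first = True; for t in text.split("{{"): …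
  ((PySem.Chars.splitOn text.toList ['{', '{']).foldl stepA (true, start_depth)).2

-- ===== PORT B =====
-- while i < n: look at text[i:i+2]; open pair → depth+1, step 2; close pair → max 0 (depth-1), step 2; else step 1
def altScan : List Char → Int → Int
  | [], depth => depth
  | [_], depth => depth
  | c1 :: c2 :: rest, depth =>
    if c1 = '{' ∧ c2 = '{' then altScan rest (depth + 1)
    else if c1 = '}' ∧ c2 = '}' then altScan rest (max 0 (depth - 1))
    else altScan (c2 :: rest) depth
termination_by l => l.length

def get_nest_depth_alt (text : String) (start_depth : Int) : Int :=
  altScan text.toList start_depth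

-- ===== PRECONDITION & SPEC =====
-- A (and B) raise ValueError when start_depth < 0; exactly those inputs are excluded.
def Pre_get_nest_depth (text : String) (start_depth : Int) : Prop := 0 ≤ start_depth
instance (text : String) (start_depth : Int) : Decidable (Pre_get_nest_depth text start_depth) := by
  unfold Pre_get_nest_depth; infer_instance

def pvWitness_get_nest_depth : String × Int := ("a{{b}}", 1)

def Spec_get_nest_depth (text : String) (start_depth : Int) (out : Int) : Prop :=
  out = get_nest_depth_alt text start_depth
instance (text : String) (start_depth : Int) (out : Int) : Decidable (Spec_get_nest_depth text start_depth out) := by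
  unfold Spec_get_nest_depth; infer_instance

-- ===== CLAIM (what is proved, stated in full; the proofs are below) =====
def Claim_equal_get_nest_depth : Prop := ∀ (text : String) (start_depth : Int), Dom_get_nest_depth text start_depth → Pre_get_nest_depth text start_depth → Spec_get_nest_depth text start_depth (get_nest_depth text start_depth)


-- structural versions of A's primitives, specialised to the two brace digraphs
def splitCC : List Char → List (List Char)
  | [] => [[]]
  | [c] => [[c]]
  | c1 :: c2 :: r =>
    if c1 = '{' ∧ c2 = '{' then [] :: splitCC r
    else (splitCC (c2 :: r)).modifyHead (c1 :: ·)
termination_by l => l.length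

def cntCC : List Char → Nat
  | [] => 0
  | [_] => 0
  | c1 :: c2 :: r =>
    if c1 = '}' ∧ c2 = '}' then cntCC r + 1
    else cntCC (c2 :: r)
termination_by l => l.length

lemma cntCC_go_eq : ∀ fuel (l : List Char) (acc : Nat), l.length ≤ fuel →
    PySem.Chars.count.go ['}', '}'] fuel l acc = acc + cntCC l := by
  intro fuel
  induction fuel with
  | zero =>
    intro l acc h
    cases l with
    | nil => simp [PySem.Chars.count.go, cntCC]
    | cons c r => simp at h
  | succ fuel ih =>
    intro l acc h
    cases l with
    | nil => simp [PySem.Chars.count.go, cntCC]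
    | cons c1 r =>
      cases r with
      | nil =>
        simp [PySem.Chars.count.go, List.isPrefixOf]
        rw [ih [] acc (by simp)]
        simp [cntCC]
      | cons c2 r2 =>
        by_cases hc : c1 = '}' ∧ c2 = '}'
        · obtain ⟨h1, h2⟩ := hc
          subst h1; subst h2
          simp [PySem.Chars.count.go, List.isPrefixOf]
          rw [ih r2 (acc + 1) (by simp at h ⊢; omega)]
          simp [cntCC]; omega
        · have hpre : (['}', '}'].isPrefixOf (c1 :: c2 :: r2)) = false := by
            simp [List.isPrefixOf]
            intro h1 h2; exact hc ⟨h1.symm, h2.symm⟩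
          simp [PySem.Chars.count.go, hpre]
          rw [ih (c2 :: r2) acc (by simp at h ⊢; omega)]
          rw [show cntCC (c1 :: c2 :: r2) = cntCC (c2 :: r2) by simp [cntCC, hc]]

lemma count_eq_cntCC (l : List Char) : PySem.Chars.count l ['}', '}'] = cntCC l := by
  simp [PySem.Chars.count]
  rw [cntCC_go_eq l.length l 0 le_rfl]; omega

lemma splitCC_ne_nil (l : List Char) : splitCC l ≠ [] := by
  induction l using splitCC.induct with
  | case1 => simp [splitCC]
  | case2 c => simp [splitCC]
  | case3 c1 c2 r h ih => simp [splitCC, h]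
  | case4 c1 c2 r h ih =>
    simp only [splitCC, if_neg h]
    cases h' : splitCC (c2 :: r) with
    | nil => exact absurd h' ih
    | cons a t => simp

lemma splitCC_cons_no (c : Char) (r : List Char)
    (h : ∀ c2 r2, r = c2 :: r2 → ¬(c = '{' ∧ c2 = '{')) :
    splitCC (c :: r) = (splitCC r).modifyHead (c :: ·) := by
  cases r with
  | nil => simp [splitCC]
  | cons c2 r2 => simp [splitCC, h c2 r2 rfl]

lemma splitCC_head_shape (c : Char) (r : List Char) :
    (splitCC (c :: r)).headI = [] ∨ ∃ u, (splitCC (c :: r)).headI = c :: u := by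
  cases r with
  | nil => exact Or.inr ⟨[], by simp [splitCC]⟩
  | cons c2 r2 =>
    by_cases h : c = '{' ∧ c2 = '{'
    · left; simp [splitCC, h]
    · right
      simp only [splitCC, if_neg h]
      cases h' : splitCC (c2 :: r2) with
      | nil => exact absurd h' (splitCC_ne_nil _)
      | cons a t => exact ⟨a, by simp⟩

lemma splitCC_go_eq : ∀ fuel (l cur : List Char) (acc : List (List Char)), l.length < fuel →
    PySem.Chars.splitOn.go ['{', '{'] fuel l cur acc
      = acc.reverse ++ (splitCC l).modifyHead (cur.reverse ++ ·) := by
  intro fuel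
  induction fuel with
  | zero => intro l cur acc h; omega
  | succ fuel ih =>
    intro l cur acc h
    cases l with
    | nil => simp [PySem.Chars.splitOn.go, splitCC]
    | cons c1 r =>
      cases r with
      | nil =>
        have hpre : (['{', '{'].isPrefixOf [c1]) = false := by simp [List.isPrefixOf]
        simp only [PySem.Chars.splitOn.go, hpre, Bool.false_eq_true, if_false]
        rw [ih [] (c1 :: cur) acc (by simp at h ⊢; omega)]
        simp [splitCC]
      | cons c2 r2 =>
        by_cases hc : c1 = '{' ∧ c2 = '{'
        · obtain ⟨h1, h2⟩ := hc
          subst h1; subst h2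
          simp only [PySem.Chars.splitOn.go, List.isPrefixOf, beq_self_eq_true,
            Bool.and_self, Bool.true_and, if_true]
          rw [show List.drop (['{', '{'] : List Char).length ('{' :: '{' :: r2) = r2 from rfl]
          rw [ih r2 [] (cur.reverse :: acc) (by simp at h ⊢; omega)]
          cases h' : splitCC r2 with
          | nil => exact absurd h' (splitCC_ne_nil _)
          | cons a t => simp [splitCC, h']
        · have hpre : (['{', '{'].isPrefixOf (c1 :: c2 :: r2)) = false := by
            simp [List.isPrefixOf]
            intro h1 h2; exact hc ⟨h1.symm, h2.symm⟩
          simp only [PySem.Chars.splitOn.go, hpre, Bool.false_eq_true, if_false]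
          rw [ih (c2 :: r2) (c1 :: cur) acc (by simp at h ⊢; omega)]
          rw [show splitCC (c1 :: c2 :: r2) = (splitCC (c2 :: r2)).modifyHead (c1 :: ·) by
            simp [splitCC, hc]]
          cases h' : splitCC (c2 :: r2) with
          | nil => exact absurd h' (splitCC_ne_nil _)
          | cons a t => simp

lemma splitOn_eq_splitCC (l : List Char) : PySem.Chars.splitOn l ['{', '{'] = splitCC l := by
  rw [PySem.Chars.splitOn, splitCC_go_eq (l.length + 1) l [] [] (by omega)]
  cases h' : splitCC l with
  | nil => exact absurd h' (splitCC_ne_nil _)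
  | cons a t => simp

def procSegs (segs : List (List Char)) (d : Int) : Int :=
  segs.foldl (fun d t => max 0 (d + 1 - (cntCC t : Int))) d

lemma stepA_false (d : Int) (t : List Char) :
    stepA (false, d) t = (false, max 0 (d + 1 - (cntCC t : Int))) := by
  simp [stepA, count_eq_cntCC]

lemma foldl_false (segs : List (List Char)) (d : Int) :
    (segs.foldl stepA (false, d)).2 = procSegs segs d := by
  induction segs generalizing d with
  | nil => simp [procSegs]
  | cons t segs ih =>
    rw [List.foldl_cons, stepA_false, ih]
    simp [procSegs]

lemma mainPZ : ∀ n (l : List Char), l.length ≤ n →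
    (∀ e : Int, 0 ≤ e → procSegs (splitCC l) e = altScan l (e + 1)) ∧
    (procSegs (splitCC l).tail 0 = altScan l 0) := by
  intro n
  induction n with
  | zero =>
    intro l hl
    have : l = [] := by cases l with | nil => rfl | cons a t => simp at hl
    subst this
    constructor
    · intro e he; simp [splitCC, procSegs, altScan, cntCC]; omega
    · simp [splitCC, procSegs, altScan]
  | succ n ih =>
    intro l hl
    cases l with
    | nil =>
      constructor
      · intro e he; simp [splitCC, procSegs, altScan, cntCC]; omega
      · simp [splitCC, procSegs, altScan]
    | cons c1 r =>
      cases r with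
      | nil =>
        constructor
        · intro e he; simp [splitCC, procSegs, altScan, cntCC]; omega
        · simp [splitCC, procSegs, altScan]
      | cons c2 r2 =>
        have hr2 : r2.length ≤ n := by simp at hl; omega
        have hr1 : (c2 :: r2).length ≤ n := by simp at hl ⊢; omega
        by_cases h1 : c1 = '{' ∧ c2 = '{'
        · -- "{{" at the front
          obtain ⟨hA, hB⟩ := h1; subst hA; subst hB
          have hsp : splitCC ('{' :: '{' :: r2) = [] :: splitCC r2 := by simp [splitCC]
          constructor
          · intro e he
            rw [hsp]
            have : procSegs ([] :: splitCC r2) e = procSegs (splitCC r2) (e + 1) := by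
              simp [procSegs, cntCC]
              congr 1; omega
            rw [this, (ih r2 hr2).1 (e + 1) (by omega)]
            simp [altScan]
          · rw [hsp]
            have := (ih r2 hr2).1 0 le_rfl
            simp only [List.tail_cons]
            rw [this]; simp [altScan]
        · by_cases h2 : c1 = '}' ∧ c2 = '}'
          · -- "}}" at the front
            obtain ⟨hA, hB⟩ := h2; subst hA; subst hB
            obtain ⟨t0, rest, hsp'⟩ : ∃ t0 rest, splitCC r2 = t0 :: rest := by
              cases h' : splitCC r2 with
              | nil => exact absurd h' (splitCC_ne_nil _)
              | cons a t => exact ⟨a, t, rfl⟩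
            have hsp : splitCC ('}' :: '}' :: r2) = ('}' :: '}' :: t0) :: rest := by
              rw [show ('}' :: '}' :: r2 : List Char) = '}' :: ('}' :: r2) by rfl]
              rw [splitCC_cons_no '}' ('}' :: r2) (by intro a b hab hcc; simp_all)]
              rw [splitCC_cons_no '}' r2 (by
                intro a b hab hcc
                obtain ⟨hx, _⟩ := hcc; simp at hx)]
              rw [hsp']; simp
            have hcnt : cntCC ('}' :: '}' :: t0) = cntCC t0 + 1 := by simp [cntCC]
            constructor
            · intro e he
              rw [hsp]
              simp only [procSegs, List.foldl_cons, hcnt]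
              by_cases he0 : e = 0
              · subst he0
                have hz := (ih r2 hr2).2
                rw [hsp'] at hz
                simp only [List.tail_cons] at hz
                rw [show (max 0 (0 + 1 - ((cntCC t0 + 1 : Nat) : Int))) = 0 by push_cast; omega]
                show procSegs rest 0 = altScan ('}' :: '}' :: r2) (0 + 1)
                rw [hz]
                simp [altScan]
              · have he1 : 1 ≤ e := by omega
                have hp := (ih r2 hr2).1 (e - 1) (by omega)
                rw [hsp'] at hp
                simp only [procSegs, List.foldl_cons] at hp
                have harg : max 0 (e + 1 - ((cntCC t0 + 1 : Nat) : Int))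
                    = max 0 (e - 1 + 1 - (cntCC t0 : Int)) := by push_cast; congr 1; omega
                show procSegs rest (max 0 (e + 1 - ((cntCC t0 + 1 : Nat) : Int)))
                    = altScan ('}' :: '}' :: r2) (e + 1)
                rw [harg]
                show procSegs rest _ = _
                rw [show (procSegs rest (max 0 (e - 1 + 1 - (cntCC t0 : Int))) : Int)
                    = altScan r2 (e - 1 + 1) from hp]
                simp [altScan]
                congr 1; omega
            · rw [hsp]
              simp only [List.tail_cons]
              have hz := (ih r2 hr2).2
              rw [hsp'] at hz
              simp only [List.tail_cons] at hz
              rw [hz]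
              simp [altScan]
          · -- neither "{{" nor "}}" at the front: consume one char
            obtain ⟨t0, rest, hsp'⟩ : ∃ t0 rest, splitCC (c2 :: r2) = t0 :: rest := by
              cases h' : splitCC (c2 :: r2) with
              | nil => exact absurd h' (splitCC_ne_nil _)
              | cons a t => exact ⟨a, t, rfl⟩
            have hsp : splitCC (c1 :: c2 :: r2) = (c1 :: t0) :: rest := by
              rw [splitCC_cons_no c1 (c2 :: r2) (by intro a b hab hcc; injection hab with hx hy; subst hx; exact h1 hcc)]
              rw [hsp']; simp
            have hcnt : cntCC (c1 :: t0) = cntCC t0 := by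
              rcases splitCC_head_shape c2 r2 with hh | ⟨u, hh⟩
              · rw [hsp'] at hh; simp at hh; subst hh; simp [cntCC]
              · rw [hsp'] at hh; simp at hh; subst hh
                simp [cntCC, h2]
            have haS : ∀ d : Int, altScan (c1 :: c2 :: r2) d = altScan (c2 :: r2) d := by
              intro d; simp [altScan, h1, h2]
            constructor
            · intro e he
              rw [hsp]
              simp only [procSegs, List.foldl_cons, hcnt]
              have hp := (ih (c2 :: r2) hr1).1 e he
              rw [hsp'] at hp
              simp only [procSegs, List.foldl_cons] at hp
              rw [show (List.foldl (fun d t => max 0 (d + 1 - (cntCC t : Int))) (max 0 (e + 1 - (cntCC t0 : Int))) rest : Int) = altScan (c2 :: r2) (e + 1) from hp]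
              rw [haS]
            · rw [hsp]
              simp only [List.tail_cons]
              have hz := (ih (c2 :: r2) hr1).2
              rw [hsp'] at hz
              simp only [List.tail_cons] at hz
              rw [hz, haS]

-- ===== VERDICT (by name: the statement is the Claim_ definition above) =====
theorem get_nest_depth_spec : Claim_equal_get_nest_depth := by
  intro text sd _ hpre
  unfold Spec_get_nest_depth get_nest_depth get_nest_depth_alt
  have hpre' : (0 : Int) ≤ sd := hpre
  rw [splitOn_eq_splitCC]
  obtain ⟨t0, rest, hsp⟩ : ∃ t0 rest, splitCC text.toList = t0 :: rest := by
    cases h' : splitCC text.toList with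
    | nil => exact absurd h' (splitCC_ne_nil _)
    | cons a t => exact ⟨a, t, rfl⟩
  rw [hsp, List.foldl_cons]
  by_cases hsd : sd = 0
  · subst hsd
    rw [show stepA (true, (0 : Int)) t0 = (false, 0) by simp [stepA]]
    rw [foldl_false]
    have hz := (mainPZ text.toList.length text.toList le_rfl).2
    rw [hsp] at hz
    simpa using hz
  · rw [show stepA (true, sd) t0 = (false, max 0 (sd - (cntCC t0 : Int))) by
      simp [stepA, hsd, count_eq_cntCC]]
    rw [foldl_false]
    have hp := (mainPZ text.toList.length text.toList le_rfl).1 (sd - 1) (by omega)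
    rw [hsp] at hp
    simp only [procSegs, List.foldl_cons] at hp
    rw [show max 0 (sd - (cntCC t0 : Int)) = max 0 (sd - 1 + 1 - (cntCC t0 : Int)) by congr 1; omega]
    simp only [procSegs]
    rw [hp]
    congr 1; omega
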